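-- pv_equiv track=rewrite | github.com/wspr-ncsu/jaeger | privytrace/traceback.py | parse_cdrs
-- ===== SOURCE A (Python) =====
-- def parse_cdrs(msgs: list):
--     transit = {}
--     origin = None
--     terminal = None
--
--     for msg in msgs:
--         prev, curr, next = msg.split('|')
--
--         record = {
--             'prev': prev if prev.lower() != 'none' else None,
--             'id': curr,
--             'next': next if next.lower() != 'none' else None
--         }
--
--         if record['prev'] == None:
--             origin = record
--         elif record['next'] == None:
--             terminal = record
--         else:
--             transit[curr] = record
--
--     return origin, transit, terminal
-- ===== SOURCE B (Python) =====
-- def parse_cdrs(msgs: list):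
--     # Parse once into normalized (prev, id, next) triples, then derive the three
--     # outputs by separate filtered selections (last match wins for origin/terminal).
--     def norm(s):
--         return None if s.lower() == 'none' else s
--
--     recs = []
--     for msg in msgs:
--         p, c, n = msg.split('|')
--         recs.append((norm(p), c, norm(n)))
--
--     def mk(p, c, n):
--         return {'prev': p, 'id': c, 'next': n}
--
--     transit = {c: mk(p, c, n) for (p, c, n) in recs if p is not None and n is not None}
--     origins = [mk(p, c, n) for (p, c, n) in recs if p is None]
--     terms = [mk(p, c, n) for (p, c, n) in recs if p is not None and n is None]
--     return (origins[-1] if origins else None, transit, terms[-1] if terms else None)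
-- ===== Notes on version B (the rewrite author's own statement) =====
-- stated objective: alternative
-- what changed: Instead of one stateful loop with an if/elif/else chain updating three variables, B parses all messages once into normalized triples and then derives origin/transit/terminal by three separate filtered selections (dict comprehension for transit, last element of a filtered list for origin/terminal).
import Mathlib
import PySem

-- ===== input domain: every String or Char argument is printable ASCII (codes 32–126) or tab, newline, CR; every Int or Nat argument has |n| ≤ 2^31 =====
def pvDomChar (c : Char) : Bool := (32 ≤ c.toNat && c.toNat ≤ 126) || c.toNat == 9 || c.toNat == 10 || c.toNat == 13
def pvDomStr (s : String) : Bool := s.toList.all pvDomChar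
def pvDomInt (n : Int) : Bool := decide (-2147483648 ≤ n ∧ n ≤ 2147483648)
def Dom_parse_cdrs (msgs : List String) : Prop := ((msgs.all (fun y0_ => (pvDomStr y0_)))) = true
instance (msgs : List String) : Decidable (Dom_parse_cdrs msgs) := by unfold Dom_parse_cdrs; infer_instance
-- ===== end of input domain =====

-- B replaces A's single stateful if/elif/else loop by one parse pass into normalized
-- triples followed by three separate filtered selections (alternative decomposition,
-- same cost). Equivalence is about the return value; neither version mutates its argument.

-- ===== PORT A =====
-- A's loop body, carrying (origin, transit-dict, terminal); branch order as in A.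
def pvStepA (st : Option (List (String × Option String)) × PySem.Dict String (List (String × Option String)) × Option (List (String × Option String))) (msg : String) : Option (List (String × Option String)) × PySem.Dict String (List (String × Option String)) × Option (List (String × Option String)) :=
  match PySem.Str.split? msg "|" with
  | some [prev, curr, next] =>
    let pv : Option String := if PySem.Str.lower prev ≠ "none" then some prev else none
    let nv : Option String := if PySem.Str.lower next ≠ "none" then some next else none
    let record : List (String × Option String) := [("prev", pv), ("id", some curr), ("next", nv)]
    if pv = none then (some record, st.2.1, st.2.2)
    else if nv = none then (st.1, st.2.1, some record)
    else (st.1, st.2.1.insert curr record, st.2.2)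
  | _ => st  -- Python raises ValueError here (tuple unpacking); excluded by Pre_parse_cdrs

def parse_cdrs (msgs : List String) : (Option (List (String × Option String))) × (List (String × List (String × Option String))) × (Option (List (String × Option String))) :=
  let st := msgs.foldl pvStepA (none, PySem.Dict.empty, none)
  (st.1, st.2.1.items, st.2.2)

-- ===== PORT B =====
def pvNorm (s : String) : Option String :=
  if PySem.Str.lower s = "none" then none else some s

def pvMk (p : Option String) (c : String) (n : Option String) : List (String × Option String) :=
  [("prev", p), ("id", some c), ("next", n)]

-- Source B's parsing loop body: append the normalized triple.
def pvStepB (acc : List (Option String × String × Option String)) (msg : String) : List (Option String × String × Option String) :=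
  match PySem.Str.split? msg "|" with
  | some [p, c, n] => acc ++ [(pvNorm p, c, pvNorm n)]
  | _ => acc  -- Python raises ValueError here (tuple unpacking); excluded by Pre_parse_cdrs

def parse_cdrs_alt (msgs : List String) : (Option (List (String × Option String))) × (List (String × List (String × Option String))) × (Option (List (String × Option String))) :=
  let recs := msgs.foldl pvStepB []
  let transit : PySem.Dict String (List (String × Option String)) :=
    (recs.filter (fun r => r.1 != none && r.2.2 != none)).foldl
      (fun d r => d.insert r.2.1 (pvMk r.1 r.2.1 r.2.2)) PySem.Dict.empty
  let origins := (recs.filter (fun r => r.1 == none)).map (fun r => pvMk r.1 r.2.1 r.2.2)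
  let terms := (recs.filter (fun r => r.1 != none && r.2.2 == none)).map (fun r => pvMk r.1 r.2.1 r.2.2)
  (PySem.List.pyGet? origins (-1), transit.items, PySem.List.pyGet? terms (-1))

-- ===== PRECONDITION & SPEC =====
-- Pre_ excludes exactly the inputs containing a message without exactly two '|'
-- separators, on which Python A raises ValueError during tuple unpacking.
def Pre_parse_cdrs (msgs : List String) : Prop :=
  (msgs.all (fun m => ((PySem.Str.split? m "|").getD []).length == 3)) = true
instance (msgs : List String) : Decidable (Pre_parse_cdrs msgs) := by unfold Pre_parse_cdrs; infer_instance

def pvWitness_parse_cdrs : List String := ["none|a|b", "b|c|d", "c|d|None"]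

def Spec_parse_cdrs (msgs : List String) (out : (Option (List (String × Option String))) × (List (String × List (String × Option String))) × (Option (List (String × Option String)))) : Prop := out = parse_cdrs_alt msgs
instance (msgs : List String) (out : (Option (List (String × Option String))) × (List (String × List (String × Option String))) × (Option (List (String × Option String)))) : Decidable (Spec_parse_cdrs msgs out) := by
  unfold Spec_parse_cdrs
  exact @instDecidableEqProd _ _ inferInstance (@instDecidableEqProd _ _ inferInstance inferInstance) out (parse_cdrs_alt msgs)

-- ===== CLAIM (what is proved, stated in full; the proofs are below) =====
def Claim_equal_parse_cdrs : Prop := ∀ (msgs : List String), Dom_parse_cdrs msgs → Pre_parse_cdrs msgs → Spec_parse_cdrs msgs (parse_cdrs msgs)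

-- ===== LEMMAS AND PROOFS =====

-- per-message contribution to B's record list
def pvG (msg : String) : List (Option String × String × Option String) :=
  match PySem.Str.split? msg "|" with
  | some [p, c, n] => [(pvNorm p, c, pvNorm n)]
  | _ => []

lemma pvStepB_eq (acc : List (Option String × String × Option String)) (msg : String) :
    pvStepB acc msg = acc ++ pvG msg := by
  unfold pvStepB pvG
  cases h : PySem.Str.split? msg "|" with
  | none => simp
  | some l =>
    match l with
    | [] => simp
    | [_] => simp
    | [_, _] => simp
    | [_, _, _] => simp
    | _ :: _ :: _ :: _ :: _ => simp

lemma pvRecs_eq (msgs : List String) (acc : List (Option String × String × Option String)) :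
    msgs.foldl pvStepB acc = acc ++ msgs.flatMap pvG := by
  induction msgs generalizing acc with
  | nil => simp
  | cons m rest ih => simp [List.foldl_cons, pvStepB_eq, ih, List.flatMap_cons]

lemma pvLastOr_cons {α : Type} (x : α) (l : List α) (o : Option α) :
    ((x :: l).getLast?).or o = (l.getLast?).or (some x) := by
  cases l with
  | nil => simp
  | cons y ys =>
    rw [List.getLast?_cons_cons]
    cases hl : (y :: ys).getLast? with
    | none => simp at hl
    | some z => simp

def pvMk' (r : Option String × String × Option String) : List (String × Option String) :=
  pvMk r.1 r.2.1 r.2.2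

def pvIns (d : PySem.Dict String (List (String × Option String))) (r : Option String × String × Option String) : PySem.Dict String (List (String × Option String)) :=
  d.insert r.2.1 (pvMk r.1 r.2.1 r.2.2)

lemma pvMain (msgs : List String) (o te : Option (List (String × Option String)))
    (t : PySem.Dict String (List (String × Option String))) :
    msgs.foldl pvStepA (o, t, te) =
      ( (((msgs.flatMap pvG).filter (fun r => r.1 == none)).map pvMk').getLast?.or o,
        ((msgs.flatMap pvG).filter (fun r => r.1 != none && r.2.2 != none)).foldl pvIns t,
        (((msgs.flatMap pvG).filter (fun r => r.1 != none && r.2.2 == none)).map pvMk').getLast?.or te ) := by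
  induction msgs generalizing o t te with
  | nil => simp
  | cons msg rest ih =>
    rw [List.foldl_cons, List.flatMap_cons]
    have hstep : pvStepA (o, t, te) msg =
        (pvG msg).foldl (fun st r =>
          if r.1 = none then (some (pvMk' r), st.2.1, st.2.2)
          else if r.2.2 = none then (st.1, st.2.1, some (pvMk' r))
          else (st.1, pvIns st.2.1 r, st.2.2)) (o, t, te) := by
      unfold pvStepA pvG
      cases h : PySem.Str.split? msg "|" with
      | none => simp
      | some l =>
        match l with
        | [] => simp
        | [_] => simp
        | [_, _] => simp
        | [p, c, n] => simp [pvNorm, pvMk', pvMk, pvIns]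
        | _ :: _ :: _ :: _ :: _ => simp
    rw [hstep]
    cases hg : pvG msg with
    | nil => simp [ih]
    | cons r rs =>
      have hrs : rs = [] := by
        unfold pvG at hg
        cases h : PySem.Str.split? msg "|" with
        | none => rw [h] at hg; simp at hg
        | some l =>
          rw [h] at hg
          match l with
          | [] => simp at hg
          | [_] => simp at hg
          | [_, _] => simp at hg
          | [p, c, n] => simp at hg; exact hg.2
          | _ :: _ :: _ :: _ :: _ => simp at hg
      subst hrs
      by_cases hp : r.1 = none
      · simp only [List.foldl_cons, List.foldl_nil, hp]
        rw [ih]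
        simp [hp, pvLastOr_cons]
      · by_cases hn : r.2.2 = none
        · simp only [List.foldl_cons, List.foldl_nil, if_neg hp, hn]
          rw [ih]
          simp [hp, hn, pvLastOr_cons]
        · simp only [List.foldl_cons, List.foldl_nil, if_neg hp, if_neg hn]
          rw [ih]
          simp [hp, hn]

-- ===== VERDICT (by name: the statement is the Claim_ definition above) =====
theorem parse_cdrs_spec : Claim_equal_parse_cdrs := by
  intro msgs _ _
  unfold Spec_parse_cdrs parse_cdrs parse_cdrs_alt
  rw [pvMain, pvRecs_eq]
  simp only [List.nil_append, PySem.List.pyGet?_neg_one, Option.or_none]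
  rfl
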